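-- pv_equiv track=rewrite | github.com/fatjan/practice-code | python/slot.py | solution
-- ===== SOURCE A (Python) =====
-- def solution(A, B, S):
--     # Implement your solution here
--     if len(A) > S:
--         return False
--
--     stack = []
--     result = []
--
--     def process_to_result(item, stack, result):
--         index = stack.index(item)
--         take = stack.pop(index)
--         if take in result:
--             return False
--         result.append(take)
--
--     for i in range(len(A)):
--         slot = A[i]
--         room = B[i]
--         if slot not in stack:
--             stack.append(slot)
--         else:
--             process_to_result(slot, stack, result)
--
--         if room not in stack:
--             stack.append(room)
--         else:
--             process_to_result(room, stack, result)
--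
--     for num in stack:
--         if num not in result:
--             result.append(num)
--             if len(result) == len(A):
--                 break
--
--     if len(result) == len(A):
--         return True
--
--     return False
-- ===== SOURCE B (Python) =====
-- def solution(A, B, S):
--     # Counting reformulation: the stack/result toggling of A makes membership of a
--     # value in `result` equivalent to "occurs >= 2 times" in the interleaved stream
--     # A[0],B[0],A[1],B[1],..., and the final fill succeeds iff
--     # (#values occurring >=2) <= len(A) <= (#distinct values).
--     n = len(A)
--     if n > S:
--         return False
--     counts = {}
--     for i in range(n):
--         for x in (A[i], B[i]):
--             counts[x] = counts.get(x, 0) + 1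
--     d = len(counts)
--     m = sum(1 for c in counts.values() if c >= 2)
--     return m <= n <= d
-- ===== Notes on version B (the rewrite author's own statement) =====
-- stated objective: simpler
-- what changed: Replaces the stack/result toggling with list membership tests plus the fill loop by one counting pass over the interleaved stream (a dict of occurrence counts) and the closed-form test m <= len(A) <= d, where m = number of distinct values occurring at least twice and d = number of distinct values.
import Mathlib
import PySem

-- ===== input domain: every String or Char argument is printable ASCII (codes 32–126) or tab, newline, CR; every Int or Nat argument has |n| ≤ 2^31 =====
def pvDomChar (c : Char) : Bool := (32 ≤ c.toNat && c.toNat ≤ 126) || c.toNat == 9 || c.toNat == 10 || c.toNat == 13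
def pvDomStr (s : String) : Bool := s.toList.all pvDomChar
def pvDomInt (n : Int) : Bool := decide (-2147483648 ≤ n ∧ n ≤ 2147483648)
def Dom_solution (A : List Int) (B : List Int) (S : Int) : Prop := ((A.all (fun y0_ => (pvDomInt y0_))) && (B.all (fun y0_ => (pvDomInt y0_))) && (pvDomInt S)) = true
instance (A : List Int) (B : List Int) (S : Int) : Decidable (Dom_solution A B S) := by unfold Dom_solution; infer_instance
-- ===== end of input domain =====

-- B replaces A's stack/result toggling and fill loop by a single counting pass
-- over the interleaved stream plus a closed-form comparison (simpler).


-- ===== PORT A =====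
-- process_to_result: index = stack.index(item); take = stack.pop(index); append
-- take to result unless already present.  The caller only invokes it with
-- item ∈ stack, so the `none` branches of index?/pop? are unreachable (Python
-- would raise ValueError there).
def processA (x : Int) (stack result : List Int) : List Int × List Int :=
  match PySem.List.index? stack x with
  | none => (stack, result)        -- unreachable for the calls A makes
  | some idx =>
    match PySem.List.pop? stack (idx : Int) with
    | none => (stack, result)      -- unreachable
    | some (take, stack') =>
      (stack', if take ∈ result then result else result ++ [take])

-- one element of the interleaved stream: `if x not in stack: append else process`
def stepA (st : List Int × List Int) (x : Int) : List Int × List Int :=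
  if x ∈ st.1 then processA x st.1 st.2 else (st.1 ++ [x], st.2)

-- `for num in stack: if num not in result: result.append(num); if len(result)==n: break`
def fillA (stack result : List Int) (n : Nat) : List Int :=
  match stack with
  | [] => result
  | num :: rest =>
    if num ∈ result then fillA rest result n
    else
      let r := result ++ [num]
      if r.length = n then r else fillA rest r n

-- A[i] is always in range; B[i] is in range exactly under Pre_solution, so the
-- `getD 0` default is never taken on admitted inputs.
def solution (A : List Int) (B : List Int) (S : Int) : Bool :=
  if (A.length : Int) > S then false
  else
    let st := (List.range A.length).foldl
      (fun st i => stepA (stepA st (A.getD i 0)) (B.getD i 0)) ([], [])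
    let result := fillA st.1 st.2 A.length
    decide (result.length = A.length)

-- ===== PORT B =====
-- counting pass `for x in (A[i], B[i]): counts[x] = counts.get(x, 0) + 1`, then
-- d = len(counts), m = sum(1 for c in counts.values() if c >= 2), m <= n <= d.
def solution_alt (A : List Int) (B : List Int) (S : Int) : Bool :=
  let n := A.length
  if (n : Int) > S then false
  else
    let counts := (List.range n).foldl
      (fun d i => [A.getD i 0, B.getD i 0].foldl
        (fun d x => d.insert x (d.getD x 0 + 1)) d)
      (PySem.Dict.empty : PySem.Dict Int Int)
    let d := PySem.Dict.size counts
    let m : Int := (PySem.Dict.values counts).foldl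
      (fun acc c => if 2 ≤ c then acc + 1 else acc) 0
    decide (m ≤ (n : Int) ∧ (n : Int) ≤ (d : Int))

-- ===== PRECONDITION & SPEC =====
-- Python A raises IndexError at B[i] exactly when len(A) ≤ S and len(B) < len(A);
-- Pre_ excludes only those raising inputs (B raises there too).
def Pre_solution (A : List Int) (B : List Int) (S : Int) : Prop :=
  ((A.length : Int) > S) ∨ A.length ≤ B.length
instance (A : List Int) (B : List Int) (S : Int) : Decidable (Pre_solution A B S) := by
  unfold Pre_solution; infer_instance
def pvWitness_solution : List Int × List Int × Int := ([1, 2], [1, 3], 5)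

def Spec_solution (A : List Int) (B : List Int) (S : Int) (out : Bool) : Prop := out = solution_alt A B S
instance (A : List Int) (B : List Int) (S : Int) (out : Bool) : Decidable (Spec_solution A B S out) := by unfold Spec_solution; infer_instance

-- ===== CLAIM (what is proved, stated in full; the proofs are below) =====
def Claim_equal_solution : Prop := ∀ (A : List Int) (B : List Int) (S : Int), Dom_solution A B S → Pre_solution A B S → Spec_solution A B S (solution A B S)

-- ===== LEMMAS AND PROOFS =====

-- the interleaved stream A[0],B[0],A[1],B[1],…
def stream (A B : List Int) : List Int :=
  (List.range A.length).flatMap (fun i => [A.getD i 0, B.getD i 0])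

-- A's per-index double step is a fold over the interleaved stream
theorem foldl_range_pair {σ : Type} (f : σ → Int → σ) (g h : Nat → Int) (n : Nat) (init : σ) :
    (List.range n).foldl (fun st i => f (f st (g i)) (h i)) init
      = ((List.range n).flatMap (fun i => [g i, h i])).foldl f init := by
  induction n generalizing init with
  | zero => rfl
  | succ n ih =>
      rw [List.range_succ, List.foldl_append, List.flatMap_append, List.foldl_append, ih]
      rfl

-- B's per-index inner fold is likewise a fold over the interleaved stream
theorem foldl_range_flat {σ : Type} (f : σ → Int → σ) (g : Nat → List Int) (n : Nat) (init : σ) :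
    (List.range n).foldl (fun st i => (g i).foldl f st) init
      = ((List.range n).flatMap g).foldl f init := by
  induction n generalizing init with
  | zero => rfl
  | succ n ih =>
      rw [List.range_succ, List.foldl_append, List.flatMap_append, List.foldl_append, ih]
      simp

theorem length_flatMap_pair (g h : Nat → Int) (n : Nat) :
    ((List.range n).flatMap (fun i => [g i, h i])).length = 2 * n := by
  induction n with
  | zero => rfl
  | succ n ih =>
      rw [List.range_succ, List.flatMap_append, List.length_append, ih]
      simp; omega

-- on a member, process_to_result pops the FIRST occurrence (= List.erase)
theorem eraseIdx_append_cons (pre suf : List Int) (x : Int) :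
    (pre ++ x :: suf).eraseIdx pre.length = pre ++ suf := by
  induction pre with
  | nil => simp
  | cons a l ih => simpa using ih

theorem processA_mem (x : Int) (stack result : List Int) (hx : x ∈ stack) :
    processA x stack result
      = (stack.erase x, if x ∈ result then result else result ++ [x]) := by
  obtain ⟨k, hk⟩ := Option.isSome_iff_exists.mp
    ((PySem.List.index?_isSome_iff (xs := stack) (v := x)).mpr hx)
  obtain ⟨pre, suf, hsp, hlen, hxp⟩ := (PySem.List.index?_eq_some_iff _ _ _).mp hk
  subst hsp
  subst hlen
  have hplt : pre.length < (pre ++ x :: suf).length := by simp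
  have hpop := PySem.List.pop?_natCast (xs := pre ++ x :: suf) (n := pre.length) hplt
  have hget : (pre ++ x :: suf)[pre.length]'hplt = x := by simp
  have herase : (pre ++ x :: suf).erase x = pre ++ suf := by
    rw [List.erase_append_right _ hxp]; simp
  rw [processA]
  simp only [hk, hpop, hget, herase, eraseIdx_append_cons]

theorem count_app (t : List Int) (y x : Int) :
    (t ++ [x]).count y = t.count y + (if y = x then 1 else 0) := by
  by_cases h : y = x
  · simp [h]
  · rw [if_neg h, List.count_append]
    have : List.count y [x] = 0 := by
      simp [List.count_singleton]
      exact fun hh => h hh.symm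
    omega

theorem invariant (s : List Int) :
    (s.foldl stepA ([], [])).1.Nodup ∧ (s.foldl stepA ([], [])).2.Nodup ∧
    (∀ x, x ∈ (s.foldl stepA ([], [])).2 ↔ 2 ≤ s.count x) ∧
    (∀ x, x ∈ (s.foldl stepA ([], [])).1 ↔ s.count x % 2 = 1) ∧
    2 * (s.foldl stepA ([], [])).2.length
      + ((s.foldl stepA ([], [])).1.filter (fun y => y ∉ (s.foldl stepA ([], [])).2)).length
      ≤ s.length := by
  induction s using List.reverseRecOn with
  | nil => simp
  | append_singleton s x ih =>
    obtain ⟨hstk, hres, hmemr, hmems, hlen⟩ := ih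
    rw [List.foldl_append]
    set st := s.foldl stepA ([], []) with hst
    simp only [List.foldl_cons, List.foldl_nil, List.length_append, List.length_singleton]
    by_cases hx : x ∈ st.1
    · -- x was in the stack: pop it, move it to result if new
      have hodd : s.count x % 2 = 1 := (hmems x).mp hx
      simp only [stepA, if_pos hx, processA_mem x st.1 st.2 hx]
      by_cases hr : x ∈ st.2
      · -- already in result: result unchanged
        have h2c : 2 ≤ s.count x := (hmemr x).mp hr
        simp only [if_pos hr]
        refine ⟨hstk.erase x, hres, ?_, ?_, ?_⟩
        · intro y
          rw [count_app]
          by_cases hyx : y = x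
          · subst hyx
            rw [if_pos rfl]
            constructor
            · intro _; omega
            · intro _; exact hr
          · rw [if_neg hyx, Nat.add_zero]; exact hmemr y
        · intro y
          rw [count_app]
          by_cases hyx : y = x
          · subst hyx
            rw [if_pos rfl]
            constructor
            · intro hy; exact absurd hy hstk.not_mem_erase
            · intro h; exact absurd h (by omega)
          · rw [if_neg hyx, Nat.add_zero, List.mem_erase_of_ne hyx]
            exact hmems y
        · have hsub : List.Sublist ((st.1.erase x).filter (fun y => y ∉ st.2))
              (st.1.filter (fun y => y ∉ st.2)) :=
            List.Sublist.filter _ List.erase_sublist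
          have := hsub.length_le
          omega
      · -- new to result: result gains x, the filtered stack loses x
        simp only [if_neg hr]
        have hcx1 : s.count x = 1 := by
          have : ¬ 2 ≤ s.count x := fun h => hr ((hmemr x).mpr h)
          omega
        refine ⟨hstk.erase x, ?_, ?_, ?_, ?_⟩
        · rw [List.nodup_append]
          exact ⟨hres, List.nodup_singleton x, by
            intro a ha b hb h
            subst h
            rw [List.mem_singleton] at hb
            subst hb
            exact hr ha⟩
        · intro y
          rw [count_app, List.mem_append, List.mem_singleton]
          by_cases hyx : y = x
          · subst hyx
            rw [if_pos rfl]
            constructor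
            · intro _; omega
            · intro _; right; rfl
          · rw [if_neg hyx, Nat.add_zero]
            simp only [hyx, or_false]
            exact hmemr y
        · intro y
          rw [count_app]
          by_cases hyx : y = x
          · subst hyx
            rw [if_pos rfl]
            constructor
            · intro hy; exact absurd hy hstk.not_mem_erase
            · intro h; exact absurd h (by omega)
          · rw [if_neg hyx, Nat.add_zero, List.mem_erase_of_ne hyx]
            exact hmems y
        · have hperm : st.1.Perm (x :: st.1.erase x) := List.perm_cons_erase hx
          have hfl : (st.1.filter (fun y => y ∉ st.2)).length
              = ((x :: st.1.erase x).filter (fun y => y ∉ st.2)).length :=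
            (hperm.filter _).length_eq
          have hfc : ((x :: st.1.erase x).filter (fun y => y ∉ st.2)).length
              = ((st.1.erase x).filter (fun y => y ∉ st.2)).length + 1 := by
            simp [hr]
          have hfeq : (st.1.erase x).filter (fun y => decide (y ∉ st.2 ++ [x]))
              = (st.1.erase x).filter (fun y => decide (y ∉ st.2)) := by
            apply List.filter_congr
            intro y hy
            have hyx : y ≠ x := fun h => hstk.not_mem_erase (h ▸ hy)
            simp [hyx]
          rw [hfeq, List.length_append, List.length_singleton]
          omega
    · -- x was not in the stack: push it
      have heven : ¬ (s.count x % 2 = 1) := fun h => hx ((hmems x).mpr h)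
      simp only [stepA, if_neg hx]
      refine ⟨?_, hres, ?_, ?_, ?_⟩
      · rw [List.nodup_append]
        exact ⟨hstk, List.nodup_singleton x, by
          intro a ha b hb h
          subst h
          rw [List.mem_singleton] at hb
          subst hb
          exact hx ha⟩
      · intro y
        rw [count_app]
        by_cases hyx : y = x
        · subst hyx
          rw [if_pos rfl, hmemr y]
          constructor <;> intro h <;> omega
        · rw [if_neg hyx, Nat.add_zero]; exact hmemr y
      · intro y
        rw [count_app, List.mem_append, List.mem_singleton]
        by_cases hyx : y = x
        · subst hyx
          rw [if_pos rfl]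
          constructor
          · intro _; omega
          · intro _; right; rfl
        · rw [if_neg hyx, Nat.add_zero]
          simp only [hyx, or_false]
          exact hmems y
      · have hle : ((st.1 ++ [x]).filter (fun y => y ∉ st.2)).length
            ≤ (st.1.filter (fun y => y ∉ st.2)).length + 1 := by
          rw [List.filter_append, List.length_append]
          have : ([x].filter (fun y => y ∉ st.2)).length ≤ 1 := by
            simpa using List.length_filter_le (fun y => decide (y ∉ st.2)) [x]
          omega
        omega

theorem fillA_length (stack : List Int) :
    ∀ (result : List Int) (n : Nat), stack.Nodup →
    (fillA stack result n).length =
      if result.length < n ∧ n ≤ result.length + (stack.filter (fun y => y ∉ result)).length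
      then n
      else result.length + (stack.filter (fun y => y ∉ result)).length := by
  induction stack with
  | nil => intro result n _; simp [fillA]
  | cons num rest ih =>
    intro result n hnd
    have hndr : rest.Nodup := hnd.of_cons
    have hnum : num ∉ rest := (List.nodup_cons.mp hnd).1
    rw [fillA]
    by_cases hmem : num ∈ result
    · rw [if_pos hmem, ih result n hndr]
      simp [hmem]
    · rw [if_neg hmem]
      simp only
      have hflt : ((num :: rest).filter (fun y => y ∉ result)).length
          = (rest.filter (fun y => y ∉ result)).length + 1 := by
        simp [hmem]
      by_cases hbreak : (result ++ [num]).length = n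
      · rw [if_pos hbreak, if_pos]
        · exact hbreak
        · rw [List.length_append, List.length_singleton] at hbreak
          rw [hflt]
          omega
      · rw [if_neg hbreak, ih (result ++ [num]) n hndr]
        have hfeq : rest.filter (fun y => decide (y ∉ result ++ [num]))
            = rest.filter (fun y => decide (y ∉ result)) := by
          apply List.filter_congr
          intro y hy
          have : y ≠ num := fun h => hnum (h ▸ hy)
          simp [this]
        rw [hfeq, hflt]
        rw [List.length_append, List.length_singleton] at hbreak
        rw [List.length_append, List.length_singleton]
        split_ifs with h2 h3 h3
        · rfl
        · omega
        · omega
        · omega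

-- the values of the stream's counter, as counts over the ordered dedup
theorem counter_values (s : List Int) :
    (PySem.Dict.values (PySem.Dict.counter s) : List Int)
      = (PySem.List.dedup s).map (fun k => (s.count k : Int)) := by
  have h := PySem.Dict.items_counter (xs := s)
  simp only [PySem.Dict.values, h]
  rw [List.map_map]
  simp [PySem.List.dedup_eq_ofList]

theorem nodup_length_eq {l l' : List Int} (h : l.Nodup) (h' : l'.Nodup)
    (hm : ∀ x, x ∈ l ↔ x ∈ l') : l.length = l'.length :=
  ((List.perm_ext_iff_of_nodup h h').mpr hm).length_eq

-- ===== VERDICT (by name: the statement is the Claim_ definition above) =====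
theorem solution_spec : Claim_equal_solution := by
  intro A B S _ _
  unfold Spec_solution solution solution_alt
  by_cases hS : (A.length : Int) > S
  · simp [hS]
  · simp only [if_neg hS]
    set n := A.length with hn
    rw [foldl_range_pair stepA (fun i => A.getD i 0) (fun i => B.getD i 0) n ([], [])]
    rw [foldl_range_flat (fun d x => PySem.Dict.insert d x (PySem.Dict.getD d x 0 + 1))
        (fun i => [A.getD i 0, B.getD i 0]) n PySem.Dict.empty]
    rw [show ((List.range n).flatMap (fun i => [A.getD i 0, B.getD i 0])) = stream A B from rfl]
    set s := stream A B with hs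
    rw [PySem.Dict.foldl_insert_getD_add_one_eq_counter s]
    obtain ⟨hstk, hres, hmemr, hmems, hlen⟩ := invariant s
    set st := s.foldl stepA ([], []) with hst
    rw [fillA_length st.1 st.2 n hstk]
    set m := st.2.length with hm
    set k := (st.1.filter (fun y => y ∉ st.2)).length with hk
    have hd : PySem.Dict.size (PySem.Dict.counter s) = (PySem.List.dedup s).length := by
      have h := PySem.Dict.items_counter (xs := s)
      simp [PySem.Dict.size, h, PySem.List.dedup_eq_ofList]
    have hmB : ((PySem.Dict.values (PySem.Dict.counter s)).foldl
        (fun acc c => if 2 ≤ c then acc + 1 else acc) (0 : Int))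
        = ((PySem.List.dedup s).countP (fun x => 2 ≤ s.count x) : Int) := by
      rw [counter_values, PySem.List.foldl_ite_add_one, zero_add, List.countP_map]
      congr 1
      apply List.countP_congr
      intro x _
      simp
    have hmcount : m = (PySem.List.dedup s).countP (fun x => 2 ≤ s.count x) := by
      rw [List.countP_eq_length_filter]
      apply nodup_length_eq hres ((PySem.List.nodup_dedup s).filter _)
      intro x
      rw [hmemr x, List.mem_filter, PySem.List.mem_dedup]
      constructor
      · intro h
        exact ⟨List.count_pos_iff.mp (by omega), by simpa using h⟩
      · intro ⟨_, h⟩; simpa using h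
    have hdval : m + k = (PySem.List.dedup s).length := by
      have hnod : (st.2 ++ st.1.filter (fun y => y ∉ st.2)).Nodup := by
        rw [List.nodup_append]
        refine ⟨hres, hstk.filter _, ?_⟩
        intro a ha b hb h
        subst h
        exact (by simpa using (List.mem_filter.mp hb).2 : a ∉ st.2) ha
      have hmemu : ∀ x, x ∈ st.2 ++ st.1.filter (fun y => y ∉ st.2)
          ↔ x ∈ PySem.List.dedup s := by
        intro x
        rw [List.mem_append, List.mem_filter, PySem.List.mem_dedup]
        constructor
        · rintro (h | ⟨h1, _⟩)
          · exact List.count_pos_iff.mp (by have := (hmemr x).mp h; omega)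
          · exact List.count_pos_iff.mp (by have := (hmems x).mp h1; omega)
        · intro hxs
          have hc : 1 ≤ s.count x := List.count_pos_iff.mpr hxs
          by_cases h2 : 2 ≤ s.count x
          · left; exact (hmemr x).mpr h2
          · right
            refine ⟨(hmems x).mpr (by omega), ?_⟩
            simpa using fun hmem => h2 ((hmemr x).mp hmem)
      have h := nodup_length_eq hnod (PySem.List.nodup_dedup s) hmemu
      simpa [hm, hk] using h
    have h2n : 2 * m + k ≤ 2 * n := by
      have hlen2 : s.length = 2 * n := length_flatMap_pair (fun i => A.getD i 0) (fun i => B.getD i 0) n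
      omega
    rw [hmB, hd, ← hmcount, ← hdval]
    simp only [decide_eq_decide]
    split_ifs with hcond
    · push_cast
      omega
    · push_cast
      omega
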